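-- pv_equiv track=rewrite | github.com/DmitryBogomolov/training-plan-parser | trpp/text_parser.py | split_to_parts
-- ===== SOURCE A (Python) =====
-- def split_to_parts(lines):
--     anchors = []
--     is_data = True
--     for i, line in enumerate(lines):
--         if bool(line) == is_data:
--             anchors.append(i)
--             is_data = not is_data
--     if len(anchors) % 2 == 1:
--         anchors.append(len(lines))
--     parts = []
--     for i in range(0, len(anchors), 2):
--         start, end = anchors[i], anchors[i + 1]
--         parts.append(lines[start:end])
--     return parts
-- ===== SOURCE B (Python) =====
-- def split_to_parts(lines):
--     parts = []
--     run = []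
--     for line in lines:
--         if line:
--             run.append(line)
--         elif run:
--             parts.append(run)
--             run = []
--     if run:
--         parts.append(run)
--     return parts
-- ===== Notes on version B (the rewrite author's own statement) =====
-- stated objective: simpler
-- what changed: Replaces the two-pass find-anchor-indices-then-pair-and-slice algorithm by a single pass that accumulates the current run of non-empty lines directly and flushes it at each empty line (and at the end).
import Mathlib
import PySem

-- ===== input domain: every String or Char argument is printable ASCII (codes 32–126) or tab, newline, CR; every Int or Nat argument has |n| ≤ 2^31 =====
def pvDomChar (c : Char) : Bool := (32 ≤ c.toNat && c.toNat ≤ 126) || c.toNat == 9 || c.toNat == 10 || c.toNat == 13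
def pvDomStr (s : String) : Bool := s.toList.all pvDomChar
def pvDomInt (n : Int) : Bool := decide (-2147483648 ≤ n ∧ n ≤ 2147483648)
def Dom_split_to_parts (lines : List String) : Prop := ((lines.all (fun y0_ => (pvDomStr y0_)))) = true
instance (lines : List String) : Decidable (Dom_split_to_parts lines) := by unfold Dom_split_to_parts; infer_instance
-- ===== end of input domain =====

-- B replaces A's find-anchor-indices-then-pair-and-slice with a single pass accumulating the current run of non-empty lines (simpler; same asymptotic cost).


-- ===== PORT A =====
def split_to_parts (lines : List String) : List (List String) :=
  let r := (PySem.List.enumerate lines 0).foldl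
    (fun (st : List Int × Bool) (p : Int × String) =>
      if (decide (p.2 ≠ "")) == st.2 then (st.1 ++ [p.1], !st.2) else st)
    ([], true)
  let anchors := if r.1.length % 2 == 1 then r.1 ++ [(lines.length : Int)] else r.1
  (PySem.List.pyRange 0 (anchors.length : Int) 2).foldl
    (fun (parts : List (List String)) (i : Int) =>
      parts ++ [PySem.List.slice lines (some (PySem.List.pyGetD anchors i 0)) (some (PySem.List.pyGetD anchors (i + 1) 0))])
    []

-- ===== PORT B =====
def split_to_parts_alt (lines : List String) : List (List String) :=
  let r := lines.foldl
    (fun (st : List (List String) × List String) (line : String) =>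
      if line ≠ "" then (st.1, st.2 ++ [line])
      else if st.2 ≠ [] then (st.1 ++ [st.2], ([] : List String)) else st)
    ([], [])
  if r.2 ≠ [] then r.1 ++ [r.2] else r.1

-- ===== PRECONDITION & SPEC =====
def Spec_split_to_parts (lines : List String) (out : List (List String)) : Prop := out = split_to_parts_alt lines
instance (lines : List String) (out : List (List String)) : Decidable (Spec_split_to_parts lines out) := by unfold Spec_split_to_parts; infer_instance

-- ===== CLAIM (what is proved, stated in full; the proofs are below) =====
def Claim_equal_split_to_parts : Prop := ∀ (lines : List String), Dom_split_to_parts lines → Spec_split_to_parts lines (split_to_parts lines)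

-- ===== LEMMAS AND PROOFS =====

-- A's anchor list, relocated to offset 0 (proof-side model of A's first loop).
def pvAnch : Bool → List String → List Int
  | _, [] => []
  | b, l :: ls =>
    if (decide (l ≠ "")) == b then 0 :: (pvAnch (!b) ls).map (· + 1)
    else (pvAnch b ls).map (· + 1)

-- A's is_data flag after the first loop.
def pvEndB : Bool → List String → Bool
  | b, [] => b
  | b, l :: ls => if (decide (l ≠ "")) == b then pvEndB (!b) ls else pvEndB b ls

-- A's anchor list with the odd-length fallback applied.
def pvAF (ls : List String) : List Int :=
  if (pvAnch true ls).length % 2 == 1 then pvAnch true ls ++ [(ls.length : Int)] else pvAnch true ls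

-- A's second loop as a recursion consuming anchors two at a time.
def pvPairs (xs : List String) : List Int → List (List String)
  | s :: e :: rest => PySem.List.slice xs (some s) (some e) :: pvPairs xs rest
  | _ => []

theorem pv_fold_anch (ls : List String) : ∀ (b : Bool) (acc : List Int) (s : Int),
    (PySem.List.enumerate ls s).foldl
      (fun (st : List Int × Bool) (p : Int × String) =>
        if (decide (p.2 ≠ "")) == st.2 then (st.1 ++ [p.1], !st.2) else st)
      (acc, b)
    = (acc ++ (pvAnch b ls).map (· + s), pvEndB b ls) := by
  induction ls with
  | nil => intro b acc s; simp [PySem.List.enumerate, pvAnch, pvEndB]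
  | cons l ls ih =>
    intro b acc s
    rw [PySem.List.enumerate_cons]
    simp only [List.foldl_cons]
    by_cases h : (decide (l ≠ "")) == b
    · rw [if_pos h, ih]
      simp only [pvAnch, pvEndB, h, if_pos]
      simp [List.map_map]
      intro z _; omega
    · rw [if_neg h, ih]
      simp only [pvAnch, pvEndB, h]
      simp [List.map_map]
      intro z _; omega

theorem pv_anch_nonneg : ∀ (b : Bool) (ls : List String) (z : Int), z ∈ pvAnch b ls → 0 ≤ z := by
  intro b ls
  induction ls generalizing b with
  | nil => simp [pvAnch]
  | cons l ls ih =>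
    intro z hz
    simp only [pvAnch] at hz
    split at hz
    · rcases List.mem_cons.1 hz with h | h
      · omega
      · obtain ⟨w, hw, rfl⟩ := List.mem_map.1 h
        have := ih _ _ hw; omega
    · obtain ⟨w, hw, rfl⟩ := List.mem_map.1 hz
      have := ih _ _ hw; omega

theorem pv_AF_nonneg (ls : List String) (z : Int) (hz : z ∈ pvAF ls) : 0 ≤ z := by
  unfold pvAF at hz
  split at hz
  · rcases List.mem_append.1 hz with h | h
    · exact pv_anch_nonneg _ _ _ h
    · simp at h; omega
  · exact pv_anch_nonneg _ _ _ hz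

theorem pv_AF_even (ls : List String) : (pvAF ls).length % 2 = 0 := by
  unfold pvAF
  split
  · rename_i h
    simp only [beq_iff_eq] at h
    simp [List.length_append]
    omega
  · rename_i h
    simp only [beq_iff_eq] at h
    omega

theorem pv_getD_cons_succ (x : Int) (xs : List Int) (i : Int) (hi : 0 ≤ i) :
    PySem.List.pyGetD (x :: xs) (i + 1) 0 = PySem.List.pyGetD xs i 0 := by
  obtain ⟨n, rfl⟩ := Int.eq_ofNat_of_zero_le hi
  have : ((n : Int) + 1) = ((n + 1 : Nat) : Int) := by omega
  rw [this, PySem.List.pyGetD_natCast, PySem.List.pyGetD_natCast]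
  simp

theorem pv_range_two (m : Nat) :
    PySem.List.pyRange 0 ((m + 2 : Nat) : Int) 2
      = 0 :: (PySem.List.pyRange 0 ((m : Nat) : Int) 2).map (· + 2) := by
  rw [PySem.List.pyRange_of_pos _ _ (by norm_num), PySem.List.pyRange_of_pos _ _ (by norm_num)]
  have h1 : (if (0:Int) < ((m + 2 : Nat) : Int) then ((((m + 2 : Nat) : Int) - 0 + 2 - 1) / 2).toNat else 0) = (m + 1) / 2 + 1 := by
    rw [if_pos (by positivity)]
    omega
  have h2 : (if (0:Int) < ((m : Nat) : Int) then ((((m : Nat) : Int) - 0 + 2 - 1) / 2).toNat else 0) = (m + 1) / 2 := by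
    split <;> omega
  rw [h1, h2, List.range_succ_eq_map]
  simp [List.map_map, Function.comp_def]
  intro z _; omega

theorem pv_loop_pairs (xs : List String) : ∀ (a : List Int), a.length % 2 = 0 → ∀ (acc : List (List String)),
    (PySem.List.pyRange 0 (a.length : Int) 2).foldl
      (fun (parts : List (List String)) (i : Int) =>
        parts ++ [PySem.List.slice xs (some (PySem.List.pyGetD a i 0)) (some (PySem.List.pyGetD a (i + 1) 0))])
      acc
    = acc ++ pvPairs xs a := by
  intro a
  induction a using pvPairs.induct with
  | case2 t ht =>
    intro h acc
    match t, ht with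
    | [], _ =>
      rw [PySem.List.pyRange_of_pos _ _ (by norm_num)]
      simp [pvPairs]
    | [s], ht => simp at h
    | s :: e :: rest, ht => exact absurd rfl (fun hh => ht s e rest hh)
  | case1 s e rest ih =>
    intro h acc
    have hr : rest.length % 2 = 0 := by simp at h; omega
    have hlen : ((s :: e :: rest).length : Int) = ((rest.length + 2 : Nat) : Int) := by simp; omega
    rw [hlen, pv_range_two rest.length, List.foldl_cons, List.foldl_map]
    have h0 : PySem.List.pyGetD (s :: e :: rest) 0 0 = s := PySem.List.pyGetD_zero_cons _ _ _
    have h1 : PySem.List.pyGetD (s :: e :: rest) (0 + 1) 0 = e := by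
      rw [pv_getD_cons_succ _ _ _ le_rfl, PySem.List.pyGetD_zero_cons]
    have hcongr : ∀ (acc' : List (List String)), ∀ i ∈ PySem.List.pyRange 0 ((rest.length : Nat) : Int) 2,
        acc' ++ [PySem.List.slice xs (some (PySem.List.pyGetD (s :: e :: rest) (i + 2) 0)) (some (PySem.List.pyGetD (s :: e :: rest) (i + 2 + 1) 0))]
        = acc' ++ [PySem.List.slice xs (some (PySem.List.pyGetD rest i 0)) (some (PySem.List.pyGetD rest (i + 1) 0))] := by
      intro acc' i hi
      have hi0 : 0 ≤ i := ((PySem.List.mem_pyRange_iff_of_pos (by norm_num) i).1 hi).1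
      have e1 : PySem.List.pyGetD (s :: e :: rest) (i + 2) 0 = PySem.List.pyGetD rest i 0 := by
        rw [show (i + 2) = (i + 1) + 1 by ring, pv_getD_cons_succ _ _ _ (by omega),
            pv_getD_cons_succ _ _ _ hi0]
      have e2 : PySem.List.pyGetD (s :: e :: rest) (i + 2 + 1) 0 = PySem.List.pyGetD rest (i + 1) 0 := by
        rw [show (i + 2 + 1) = ((i + 1) + 1) + 1 by ring, pv_getD_cons_succ _ _ _ (by omega),
            pv_getD_cons_succ _ _ _ (by omega)]
      rw [e1, e2]
    rw [PySem.List.foldl_congr_mem _ _ _ _ hcongr, h0, h1, ih hr]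
    simp [pvPairs]

theorem pv_A_eq_pairs (ls : List String) : split_to_parts ls = pvPairs ls (pvAF ls) := by
  unfold split_to_parts
  rw [pv_fold_anch ls true [] 0]
  have hmap : ((pvAnch true ls).map (· + (0:Int))) = pvAnch true ls := by
    simp
  simp only [List.nil_append, hmap]
  have hAF : (if (pvAnch true ls).length % 2 == 1 then pvAnch true ls ++ [(ls.length : Int)] else pvAnch true ls) = pvAF ls := by
    rfl
  rw [hAF, pv_loop_pairs ls (pvAF ls) (pv_AF_even ls) []]
  simp

theorem pv_slice_shift (pre xs : List String) (s e : Int) (hs : 0 ≤ s) (he : 0 ≤ e) :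
    PySem.List.slice (pre ++ xs) (some (s + (pre.length : Int))) (some (e + (pre.length : Int))) = PySem.List.slice xs (some s) (some e) := by
  rw [PySem.List.slice_toNat _ (by omega) (by omega), PySem.List.slice_toNat _ hs he]
  have h1 : (s + (pre.length : Int)).toNat = pre.length + s.toNat := by omega
  have h2 : (e + (pre.length : Int)).toNat - (pre.length + s.toNat) = e.toNat - s.toNat := by omega
  rw [h1, h2, List.drop_append]
  have h3 : List.drop (pre.length + s.toNat) pre = [] := List.drop_eq_nil_of_le (by omega)
  rw [h3, List.nil_append]
  have h4 : pre.length + s.toNat - pre.length = s.toNat := by omega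
  rw [h4]

theorem pv_pairs_shift (pre xs : List String) : ∀ (a : List Int), (∀ z ∈ a, 0 ≤ z) →
    pvPairs (pre ++ xs) (a.map (· + (pre.length : Int))) = pvPairs xs a := by
  intro a
  induction a using pvPairs.induct with
  | case1 s e rest ih =>
    intro h
    simp only [List.map_cons, pvPairs]
    rw [pv_slice_shift pre xs s e (h s (by simp)) (h e (by simp)), ih]
    intro z hz; exact h z (by simp [hz])
  | case2 t ht =>
    intro h
    match t, ht with
    | [], _ => simp [pvPairs]
    | [s], _ => simp [pvPairs]
    | s :: e :: rest, ht => exact absurd rfl (fun hh => ht s e rest hh)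

theorem pv_AF_empty (ls : List String) : pvAF ("" :: ls) = (pvAF ls).map (· + 1) := by
  unfold pvAF
  have ha : pvAnch true ("" :: ls) = (pvAnch true ls).map (· + 1) := by simp [pvAnch]
  rw [ha]
  simp only [List.length_map, List.length_cons]
  split
  · rw [List.map_append]
    congr 1
  · rfl

theorem pv_anch_run : ∀ (t d : List String), (∀ y ∈ t, y ≠ "") →
    pvAnch false (t ++ d) = (pvAnch false d).map (· + (t.length : Int)) := by
  intro t d
  induction t with
  | nil => intro _; simp
  | cons y t ih =>
    intro h
    have hy : y ≠ "" := h y (by simp)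
    have h1 : pvAnch false ((y :: t) ++ d) = (pvAnch false (t ++ d)).map (· + 1) := by
      simp [pvAnch, hy]
    rw [h1, ih (fun z hz => h z (by simp [hz])), List.map_map]
    simp only [List.length_cons]
    apply List.map_congr_left
    intro z _
    simp only [Function.comp_apply]
    omega

theorem pv_AF_cons_nil (x : String) (ls : List String) (hx : x ≠ "")
    (hd : ls.dropWhile (fun y => decide (y ≠ "")) = []) :
    pvAF (x :: ls) = [0, (ls.length : Int) + 1] := by
  have hls : ls.takeWhile (fun y => decide (y ≠ "")) = ls := by
    conv_rhs => rw [← List.takeWhile_append_dropWhile (p := fun y => decide (y ≠ "")) (l := ls)]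
    rw [hd, List.append_nil]
  have hmem : ∀ y ∈ ls, y ≠ "" := by
    intro y hy
    rw [← hls] at hy
    exact of_decide_eq_true (List.mem_takeWhile_imp (p := fun z => decide (z ≠ "")) hy)
  have ha : pvAnch true (x :: ls) = [0] := by
    have h1 : pvAnch true (x :: ls) = 0 :: (pvAnch false ls).map (· + 1) := by
      simp [pvAnch, hx]
    have h2 : pvAnch false ls = [] := by
      have h3 := pv_anch_run ls [] hmem
      simpa [pvAnch] using h3
    rw [h1, h2]; rfl
  unfold pvAF
  rw [ha]
  simp

theorem pv_AF_cons (x : String) (ls : List String) (hx : x ≠ "") (rest : List String)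
    (hd : ls.dropWhile (fun y => decide (y ≠ "")) = "" :: rest) :
    pvAF (x :: ls) = 0 :: (((ls.takeWhile (fun y => decide (y ≠ ""))).length : Int) + 1)
      :: (pvAF rest).map (· + (((ls.takeWhile (fun y => decide (y ≠ ""))).length : Int) + 2)) := by
  set t := ls.takeWhile (fun y => decide (y ≠ "")) with hts
  have hls : ls = t ++ "" :: rest := by
    conv_lhs => rw [← List.takeWhile_append_dropWhile (p := fun y => decide (y ≠ "")) (l := ls)]
    rw [hd]
  have hmem : ∀ y ∈ t, y ≠ "" := by
    intro y hy
    rw [hts] at hy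
    exact of_decide_eq_true (List.mem_takeWhile_imp (p := fun z => decide (z ≠ "")) hy)
  have ha : pvAnch true (x :: ls) = 0 :: ((t.length : Int) + 1)
      :: (pvAnch true rest).map (· + ((t.length : Int) + 2)) := by
    have h1 : pvAnch true (x :: ls) = 0 :: (pvAnch false ls).map (· + 1) := by
      simp [pvAnch, hx]
    have h2 : pvAnch false ("" :: rest) = 0 :: (pvAnch true rest).map (· + 1) := by
      simp [pvAnch]
    have h3 : pvAnch false ls = (t.length : Int) :: (pvAnch true rest).map (· + ((t.length : Int) + 1)) := by
      rw [hls, pv_anch_run t ("" :: rest) hmem, h2]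
      simp only [List.map_cons, List.map_map, Int.zero_add]
      congr 1
      apply List.map_congr_left
      intro z _
      simp only [Function.comp_apply]
      omega
    rw [h1, h3]
    simp only [List.map_cons, List.map_map]
    congr 2
    apply List.map_congr_left
    intro z _
    simp only [Function.comp_apply]
    omega
  have hlen : ls.length = t.length + 1 + rest.length := by
    rw [hls]; simp; omega
  unfold pvAF
  rw [ha]
  simp only [List.length_cons, List.length_map]
  by_cases hp : (pvAnch true rest).length % 2 = 1
  · rw [if_pos (by simp only [beq_iff_eq]; omega), if_pos (by simp only [beq_iff_eq]; omega)]
    rw [List.map_append]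
    simp only [List.map_cons, List.map_nil]
    simp
    omega
  · rw [if_neg (by simp only [beq_iff_eq]; omega), if_neg (by simp only [beq_iff_eq]; omega)]

theorem pv_B_prefix (ls : List String) : ∀ (parts : List (List String)) (run : List String),
    ls.foldl
      (fun (st : List (List String) × List String) (line : String) =>
        if line ≠ "" then (st.1, st.2 ++ [line])
        else if st.2 ≠ [] then (st.1 ++ [st.2], ([] : List String)) else st)
      (parts, run)
    = (parts ++ (ls.foldl
        (fun (st : List (List String) × List String) (line : String) =>
          if line ≠ "" then (st.1, st.2 ++ [line])
          else if st.2 ≠ [] then (st.1 ++ [st.2], ([] : List String)) else st)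
        ([], run)).1,
       (ls.foldl
        (fun (st : List (List String) × List String) (line : String) =>
          if line ≠ "" then (st.1, st.2 ++ [line])
          else if st.2 ≠ [] then (st.1 ++ [st.2], ([] : List String)) else st)
        ([], run)).2) := by
  induction ls with
  | nil => intro parts run; simp
  | cons l ls ih =>
    intro parts run
    simp only [List.foldl_cons]
    by_cases hl : l ≠ ""
    · rw [if_pos hl, if_pos hl]
      exact ih parts (run ++ [l])
    · rw [if_neg hl, if_neg hl]
      by_cases hr : run ≠ []
      · rw [if_pos hr, if_pos hr]
        simp only [List.nil_append]
        rw [ih (parts ++ [run]) [], ih [run] []]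
        simp
      · rw [if_neg hr, if_neg hr]
        exact ih parts run

theorem pv_B_run : ∀ (t : List String), (∀ y ∈ t, y ≠ "") → ∀ (d : List String) (parts : List (List String)) (run : List String),
    (t ++ d).foldl
      (fun (st : List (List String) × List String) (line : String) =>
        if line ≠ "" then (st.1, st.2 ++ [line])
        else if st.2 ≠ [] then (st.1 ++ [st.2], ([] : List String)) else st)
      (parts, run)
    = d.foldl
      (fun (st : List (List String) × List String) (line : String) =>
        if line ≠ "" then (st.1, st.2 ++ [line])
        else if st.2 ≠ [] then (st.1 ++ [st.2], ([] : List String)) else st)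
      (parts, run ++ t) := by
  intro t
  induction t with
  | nil => intro _ d parts run; simp
  | cons y t ih =>
    intro h d parts run
    have hy : y ≠ "" := h y (by simp)
    simp only [List.cons_append, List.foldl_cons, if_pos hy]
    rw [ih (fun z hz => h z (by simp [hz])) d parts (run ++ [y])]
    simp

theorem pv_B_skip (ls : List String) : split_to_parts_alt ("" :: ls) = split_to_parts_alt ls := by
  unfold split_to_parts_alt
  simp

theorem pv_B_cons (x : String) (ls : List String) (hx : x ≠ "") :
    split_to_parts_alt (x :: ls)
      = (x :: ls.takeWhile (fun y => decide (y ≠ ""))) :: split_to_parts_alt (ls.dropWhile (fun y => decide (y ≠ ""))) := by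
  have hmem : ∀ y ∈ ls.takeWhile (fun y => decide (y ≠ "")), y ≠ "" := by
    intro y hy
    exact of_decide_eq_true (List.mem_takeWhile_imp (p := fun z => decide (z ≠ "")) hy)
  rcases hd : ls.dropWhile (fun y => decide (y ≠ "")) with _ | ⟨y, rest⟩
  · have hls : ls.takeWhile (fun y => decide (y ≠ "")) = ls := by
      conv_rhs => rw [← List.takeWhile_append_dropWhile (p := fun y => decide (y ≠ "")) (l := ls)]
      rw [hd, List.append_nil]
    unfold split_to_parts_alt
    simp only [List.foldl_cons, if_pos hx, List.nil_append]
    conv_lhs => rw [show ls = ls.takeWhile (fun y => decide (y ≠ "")) ++ ([] : List String) by rw [hls]; simp]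
    rw [pv_B_run _ hmem ([] : List String) ([] : List (List String)) [x]]
    simp
  · have hy : y = "" := by
      have h2 := List.head?_dropWhile_not (fun z => decide (z ≠ "")) ls
      rw [hd] at h2
      simpa using h2
    subst hy
    rw [pv_B_skip rest]
    have hls : ls = ls.takeWhile (fun y => decide (y ≠ "")) ++ "" :: rest := by
      conv_lhs => rw [← List.takeWhile_append_dropWhile (p := fun y => decide (y ≠ "")) (l := ls)]
      rw [hd]
    unfold split_to_parts_alt
    simp only [List.foldl_cons, if_pos hx, List.nil_append]
    conv_lhs => rw [hls]
    rw [pv_B_run _ hmem ("" :: rest) ([] : List (List String)) [x]]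
    set P : List (List String) × List String := ([], [x] ++ ls.takeWhile (fun y => decide (y ≠ ""))) with hP
    rw [List.foldl_cons]
    have hstep : (if ("" : String) ≠ "" then (P.1, P.2 ++ [""])
        else if P.2 ≠ [] then (P.1 ++ [P.2], ([] : List String)) else P)
        = ([x :: ls.takeWhile (fun y => decide (y ≠ ""))], ([] : List String)) := by
      rw [hP]; simp
    rw [hstep, pv_B_prefix rest [x :: ls.takeWhile (fun y => decide (y ≠ ""))] []]
    split
    · simp
    · simp

theorem pv_main (ls : List String) : pvPairs ls (pvAF ls) = split_to_parts_alt ls := by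
  suffices H : ∀ (n : Nat) (xs : List String), xs.length ≤ n → pvPairs xs (pvAF xs) = split_to_parts_alt xs from
    H ls.length ls le_rfl
  intro n
  induction n with
  | zero =>
    intro xs h
    match xs, h with
    | [], _ => simp [pvAF, pvAnch, pvPairs, split_to_parts_alt]
  | succ n ih =>
    intro xs h
    match xs, h with
    | [], _ => simp [pvAF, pvAnch, pvPairs, split_to_parts_alt]
    | l :: ls, h =>
      by_cases hl : l = ""
      · subst hl
        rw [pv_AF_empty, pv_B_skip]
        have hsh := pv_pairs_shift [""] ls (pvAF ls) (fun z hz => pv_AF_nonneg ls z hz)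
        have hone : ((List.length ([""] : List String) : Nat) : Int) = 1 := by simp
        rw [hone] at hsh
        simp only [List.singleton_append] at hsh
        rw [hsh]
        exact ih ls (by simpa using h)
      · rcases hd : ls.dropWhile (fun y => decide (y ≠ "")) with _ | ⟨y, rest⟩
        · have hls : ls.takeWhile (fun y => decide (y ≠ "")) = ls := by
            conv_rhs => rw [← List.takeWhile_append_dropWhile (p := fun y => decide (y ≠ "")) (l := ls)]
            rw [hd, List.append_nil]
          rw [pv_AF_cons_nil l ls hl hd, pv_B_cons l ls hl, hd, hls]
          simp only [pvPairs]
          have hslice : PySem.List.slice (l :: ls) (some 0) (some ((ls.length : Int) + 1)) = l :: ls := by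
            rw [PySem.List.slice_toNat _ (by omega) (by omega)]
            have h1 : ((ls.length : Int) + 1).toNat = ls.length + 1 := by omega
            rw [h1]
            simp
          rw [hslice]
          simp [split_to_parts_alt]
        · have hy : y = "" := by
            have h2 := List.head?_dropWhile_not (fun z => decide (z ≠ "")) ls
            rw [hd] at h2
            simpa using h2
          subst hy
          have hls : ls = ls.takeWhile (fun y => decide (y ≠ "")) ++ "" :: rest := by
            conv_lhs => rw [← List.takeWhile_append_dropWhile (p := fun y => decide (y ≠ "")) (l := ls)]
            rw [hd]
          set t := ls.takeWhile (fun y => decide (y ≠ "")) with hts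
          rw [pv_AF_cons l ls hl rest hd, pv_B_cons l ls hl, hd, pv_B_skip rest]
          simp only [pvPairs]
          have hslice : PySem.List.slice (l :: ls) (some 0) (some ((t.length : Int) + 1)) = l :: t := by
            rw [PySem.List.slice_toNat _ (by omega) (by omega)]
            have h1 : ((t.length : Int) + 1).toNat = t.length + 1 := by omega
            rw [h1]
            simp only [Int.toNat_zero, List.drop_zero, Nat.sub_zero]
            rw [List.take_succ_cons]
            congr 1
            conv_lhs => rw [hls]
            exact List.take_left' rfl
          rw [hslice]
          congr 1
          have hsplit : l :: ls = (l :: (t ++ [""])) ++ rest := by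
            rw [hls]; simp
          have hpre : ((l :: (t ++ [""])).length : Int) = (t.length : Int) + 2 := by
            simp; omega
          rw [show ((fun z => z + ((t.length : Int) + 2)) : Int → Int) = (fun z => z + ((l :: (t ++ [""])).length : Int)) by rw [hpre]]
          rw [hsplit, pv_pairs_shift (l :: (t ++ [""])) rest (pvAF rest) (fun z hz => pv_AF_nonneg rest z hz)]
          apply ih
          have : ls.length = t.length + 1 + rest.length := by rw [hls]; simp; omega
          simp at h
          omega

-- ===== VERDICT (by name: the statement is the Claim_ definition above) =====
theorem split_to_parts_spec : Claim_equal_split_to_parts := by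
  intro lines _
  unfold Spec_split_to_parts
  rw [pv_A_eq_pairs, pv_main]
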